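-- pv_equiv track=rewrite | github.com/Sachu23/DMTM---MS-GSP-Algo-Implementation | candidate_generation.py | removeItem
-- ===== SOURCE A (Python) =====
-- import copy
--
-- def removeItem(s, index):
--     seqnew = copy.deepcopy(s)
--     length = Length(s)
--     if index < 0 or index >= length:
--         return []
--     count = 0
--     for element in seqnew:
--         if count + len(element) <= index:
--             count += len(element)
--         else:
--             del element[index - count]
--             break
--     return [element for element in seqnew if len(element) > 0]
--
-- def Length(s):
--     l = 0
--     for i in s:
--         l += len(i)
--     return l
-- ===== SOURCE B (Python) =====
-- def removeItem(s, index):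
--     total = sum(len(sub) for sub in s)
--     if index < 0 or index >= total:
--         return []
--     result = []
--     c = 0
--     for sub in s:
--         new = []
--         for item in sub:
--             if c != index:
--                 new.append(item)
--             c += 1
--         if new:
--             result.append(new)
--     return result
-- ===== Notes on version B (the rewrite author's own statement) =====
-- stated objective: simpler
-- what changed: Replaces deepcopy + in-place del + break + post-hoc empty filter with one constructive pass keeping a running flat counter, rebuilding each sublist without the targeted item and appending it only if non-empty.
import Mathlib
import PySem

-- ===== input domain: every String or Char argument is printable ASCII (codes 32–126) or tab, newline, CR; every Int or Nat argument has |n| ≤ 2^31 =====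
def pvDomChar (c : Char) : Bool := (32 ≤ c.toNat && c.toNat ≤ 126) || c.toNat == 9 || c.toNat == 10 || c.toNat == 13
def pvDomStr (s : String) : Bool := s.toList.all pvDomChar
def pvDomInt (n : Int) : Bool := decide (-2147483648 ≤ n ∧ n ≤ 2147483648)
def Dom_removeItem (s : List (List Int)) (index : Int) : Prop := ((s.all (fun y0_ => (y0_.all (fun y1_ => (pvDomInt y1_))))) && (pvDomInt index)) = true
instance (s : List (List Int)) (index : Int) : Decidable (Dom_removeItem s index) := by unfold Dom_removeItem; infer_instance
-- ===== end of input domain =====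

-- ===== PORT A =====
-- B replaces deepcopy + in-place del + break + post-filter with one constructive
-- counting pass; objective: simpler. Return-value equivalence only (A copies, so
-- neither mutates its argument observably).

-- total length, as A's Length computes it (a fold over the sublists)
def pvLengthA (s : List (List Int)) : Int :=
  s.foldl (fun l i => l + (i.length : Int)) 0

-- the for-loop of A: skip whole sublists while count+len <= index, then delete
-- one item and break (the deletion index is in range here, so eraseIdx/toNat is exact)
def pvLoopA : List (List Int) → Int → Int → List (List Int)
  | [], _, _ => []
  | e :: rest, count, index =>
    if count + (e.length : Int) ≤ index then
      e :: pvLoopA rest (count + (e.length : Int)) index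
    else
      e.eraseIdx (index - count).toNat :: rest

def removeItem (s : List (List Int)) (index : Int) : List (List Int) :=
  let length := pvLengthA s
  if index < 0 ∨ length ≤ index then []
  else (pvLoopA s 0 index).filter (fun e => decide (0 < e.length))

-- ===== PORT B =====
-- rebuild one sublist, dropping the item whose running flat position equals index
def pvFiltSub : List Int → Int → Int → List Int
  | [], _, _ => []
  | x :: xs, c, index =>
    if c ≠ index then x :: pvFiltSub xs (c + 1) index
    else pvFiltSub xs (c + 1) index

-- B's single pass: keep each rebuilt sublist only if non-empty
def pvLoopB : List (List Int) → Int → Int → List (List Int)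
  | [], _, _ => []
  | e :: rest, c, index =>
    let new := pvFiltSub e c index
    let restR := pvLoopB rest (c + (e.length : Int)) index
    if new ≠ [] then new :: restR else restR

def removeItem_alt (s : List (List Int)) (index : Int) : List (List Int) :=
  let total := s.foldl (fun l i => l + (i.length : Int)) 0
  if index < 0 ∨ total ≤ index then []
  else pvLoopB s 0 index

-- ===== PRECONDITION & SPEC =====
def Spec_removeItem (s : List (List Int)) (index : Int) (out : List (List Int)) : Prop := out = removeItem_alt s index
instance (s : List (List Int)) (index : Int) (out : List (List Int)) : Decidable (Spec_removeItem s index out) := by unfold Spec_removeItem; infer_instance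

-- ===== CLAIM (what is proved, stated in full; the proofs are below) =====
def Claim_equal_removeItem : Prop := ∀ (s : List (List Int)) (index : Int), Dom_removeItem s index → Spec_removeItem s index (removeItem s index)

-- ===== LEMMAS AND PROOFS =====
theorem pvFiltSub_lt (e : List Int) (c index : Int) (h : index < c) :
    pvFiltSub e c index = e := by
  induction e generalizing c with
  | nil => rfl
  | cons x xs ih =>
    simp only [pvFiltSub]
    rw [if_pos (by omega), ih _ (by omega)]

theorem pvFiltSub_ge (e : List Int) (c index : Int) (h : c + (e.length : Int) ≤ index) :
    pvFiltSub e c index = e := by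
  induction e generalizing c with
  | nil => rfl
  | cons x xs ih =>
    simp only [pvFiltSub, List.length_cons] at *
    rw [if_pos (by push_cast at h ⊢; omega), ih _ (by push_cast at h ⊢; omega)]

theorem pvFiltSub_in (e : List Int) (c index : Int) (h1 : c ≤ index)
    (h2 : index < c + (e.length : Int)) :
    pvFiltSub e c index = e.eraseIdx (index - c).toNat := by
  induction e generalizing c with
  | nil => simp at h2; omega
  | cons x xs ih =>
    simp only [pvFiltSub, List.length_cons] at *
    by_cases hc : c = index
    · rw [if_neg (by omega), pvFiltSub_lt _ _ _ (by omega)]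
      have : (index - c).toNat = 0 := by omega
      simp [hc]
    · rw [if_pos (by omega), ih _ (by omega) (by push_cast at h2 ⊢; omega)]
      have hn : (index - c).toNat = (index - (c + 1)).toNat + 1 := by omega
      rw [hn, List.eraseIdx_cons_succ]

theorem pvLoopB_lt (s : List (List Int)) (c index : Int) (h : index < c) :
    pvLoopB s c index = s.filter (fun e => decide (0 < e.length)) := by
  induction s generalizing c with
  | nil => rfl
  | cons e rest ih =>
    have hrest : pvLoopB rest (c + (e.length : Int)) index
        = rest.filter (fun e => decide (0 < e.length)) :=
      ih _ (by have := Int.natCast_nonneg e.length; omega)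
    simp only [pvLoopB, pvFiltSub_lt e c index h, hrest, List.filter_cons]
    by_cases he : e = []
    · subst he; simp
    · have : 0 < e.length := List.length_pos_iff.mpr he
      simp [he, this]

theorem pvFoldLen_shift (s : List (List Int)) (a : Int) :
    s.foldl (fun l i => l + (i.length : Int)) a
      = a + s.foldl (fun l i => l + (i.length : Int)) 0 := by
  induction s generalizing a with
  | nil => simp
  | cons e rest ih => simp only [List.foldl_cons]; rw [ih, ih (0 + _)]; ring

theorem pvMain (s : List (List Int)) (c index : Int) (h1 : c ≤ index)
    (h2 : index < c + pvLengthA s) :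
    (pvLoopA s c index).filter (fun e => decide (0 < e.length)) = pvLoopB s c index := by
  induction s generalizing c with
  | nil => simp [pvLengthA] at h2; omega
  | cons e rest ih =>
    have hlen : pvLengthA (e :: rest) = (e.length : Int) + pvLengthA rest := by
      simp only [pvLengthA, List.foldl_cons]; rw [pvFoldLen_shift]; ring
    by_cases hc : c + (e.length : Int) ≤ index
    · -- skip this sublist on both sides
      simp only [pvLoopA, pvLoopB, if_pos hc, List.filter_cons,
        pvFiltSub_ge e c index hc]
      rw [ih _ hc (by rw [hlen] at h2; omega)]
      by_cases he : e = []
      · subst he; simp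
      · have : 0 < e.length := List.length_pos_iff.mpr he
        simp [he, this]
    · -- the item is removed from this sublist
      simp only [pvLoopA, pvLoopB, if_neg hc, List.filter_cons,
        pvFiltSub_in e c index h1 (by omega)]
      rw [pvLoopB_lt rest (c + (e.length : Int)) index (by omega)]
      by_cases he : e.eraseIdx (index - c).toNat = []
      · simp [he]
      · have : 0 < (e.eraseIdx (index - c).toNat).length := List.length_pos_iff.mpr he
        simp [he, this]

-- ===== VERDICT (by name: the statement is the Claim_ definition above) =====
theorem removeItem_spec : Claim_equal_removeItem := by
  intro s index _
  unfold Spec_removeItem removeItem removeItem_alt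
  simp only [pvLengthA]
  split
  · rfl
  · next h =>
    push Not at h
    exact pvMain s 0 index h.1 (by simpa [pvLengthA] using h.2)
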